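-- pv_equiv track=rewrite | github.com/kiselyovanat/diploma | newAttack.py | del_copy
-- ===== SOURCE A (Python) =====
-- def del_copy(similiars):
--     for i in similiars:
--         if len(i) == 1:
--             for j in similiars:
--                 if (i[0] in j) & (i != j):
--                     j.remove(i[0])
--                     if len(j)==1:
--                         similiars = del_copy(similiars)
--     return(similiars)
-- ===== SOURCE B (Python) =====
-- # Same propagation process as A, but the recursive restarts are replaced by an
-- # explicit defunctionalized stack machine (frames = suspended loop positions).
-- # Like A, it mutates the inner lists of `similiars` in place and returns it.
-- def del_copy(similiars):
--     S = similiars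
--     n = len(S)
--     stack = [(0, -1)]          # frame (a, b): b == -1 means "outer check for row a"
--     while stack:
--         a, b = stack.pop()
--         if a >= n:
--             continue           # this activation's outer loop is finished
--         if b == -1:
--             if len(S[a]) == 1:
--                 stack.append((a, 0))
--             else:
--                 stack.append((a + 1, -1))
--             continue
--         if b >= n:
--             stack.append((a + 1, -1))
--             continue
--         x = S[a][0]
--         j = S[b]
--         if x in j and j != [x]:
--             j.remove(x)
--             if len(j) == 1:
--                 stack.append((a, b + 1))   # resume here after the restart
--                 stack.append((0, -1))      # restart a full scan
--                 continue
--         stack.append((a, b + 1))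
--     return S
-- ===== Notes on version B (the rewrite author's own statement) =====
-- stated objective: alternative
-- what changed: A's recursion (a new singleton restarts a full scan via a recursive call, after which the suspended nested loops resume) is replaced by a single flat loop over an explicit stack of suspended loop positions (a defunctionalized, non-recursive version of the same propagation process).
import Mathlib
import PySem

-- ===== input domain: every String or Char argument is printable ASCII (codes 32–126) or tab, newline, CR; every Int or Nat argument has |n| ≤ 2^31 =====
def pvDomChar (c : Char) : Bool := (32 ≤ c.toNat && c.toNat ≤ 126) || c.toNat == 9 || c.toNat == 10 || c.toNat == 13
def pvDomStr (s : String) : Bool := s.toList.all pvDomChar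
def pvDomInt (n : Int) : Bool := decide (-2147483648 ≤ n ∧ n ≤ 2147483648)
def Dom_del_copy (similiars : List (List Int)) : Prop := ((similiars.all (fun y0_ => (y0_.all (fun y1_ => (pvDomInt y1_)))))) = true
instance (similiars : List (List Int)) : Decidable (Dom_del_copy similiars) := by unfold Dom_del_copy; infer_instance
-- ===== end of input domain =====

-- B changes control structure only: A's recursive restarts become an explicit stack machine
-- (objective: alternative). Python A mutates the inner lists of its argument in place and
-- returns the same object; Python B performs the same in-place mutations; the theorems here
-- are about the returned value.

-- total number of elements; both ports' termination measure (cited by name in decreasing_by)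
def totalLen (S : List (List Int)) : Nat := (S.map List.length).sum

theorem length_remove_lt {j : List Int} {x : Int} (hx : x ∈ j) :
    ((PySem.List.remove? j x).getD j).length < j.length := by
  rw [PySem.List.remove?_eq_some_erase j x hx]
  have h0 : 0 < j.length := List.length_pos_of_mem hx
  simp [List.length_erase_of_mem hx]
  omega

theorem totalLen_set_lt {S : List (List Int)} {b : Nat} {j' : List Int}
    (hb : b < S.length) (hlt : j'.length < (S.getD b []).length) :
    totalLen (S.set b j') < totalLen S := by
  induction S generalizing b with
  | nil => simp at hb
  | cons h t ih =>
    cases b with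
    | zero => simp [totalLen] at *; omega
    | succ b =>
      simp only [List.set, totalLen, List.map_cons, List.sum_cons, List.getD_cons_succ, List.length_cons] at *
      have := ih (b := b) (by omega) (by simpa using hlt)
      omega

-- ===== PORT A =====
-- A = recursive procedure with two nested index loops; a new singleton restarts a full scan
-- (the recursive call), then the suspended loops resume.  Results carry their invariants
-- (size does not grow, length preserved) as a subtype, for termination.
mutual
def outerA (a : Nat) (S : List (List Int)) :
    {T : List (List Int) // totalLen T ≤ totalLen S ∧ T.length = S.length} :=
  if h : a < S.length then
    if (S.getD a []).length = 1 then
      match innerA a 0 S with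
      | ⟨T, hT⟩ =>
        match outerA (a + 1) T with
        | ⟨U, hU⟩ => ⟨U, le_trans hU.1 hT.1, hU.2.trans hT.2⟩
    else
      outerA (a + 1) S
  else ⟨S, le_rfl, rfl⟩
termination_by (totalLen S, 1, S.length - a)
decreasing_by
  · exact Prod.Lex.right _ (Prod.Lex.left _ _ (by omega))
  · rcases lt_or_eq_of_le hT.1 with h' | h'
    · exact Prod.Lex.left _ _ h'
    · rw [h', hT.2]
      exact Prod.Lex.right _ (Prod.Lex.right _ (by omega))
  · exact Prod.Lex.right _ (Prod.Lex.right _ (by omega))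

def innerA (a : Nat) (b : Nat) (S : List (List Int)) :
    {T : List (List Int) // totalLen T ≤ totalLen S ∧ T.length = S.length} :=
  if hb : b < S.length then
    -- i = similiars[a] (re-read each step, as Python does), x = i[0], j = similiars[b]
    if hc : (S.getD a []).headD 0 ∈ S.getD b [] ∧ S.getD a [] ≠ S.getD b [] then
      -- j.remove(i[0])
      have hlt : totalLen (S.set b ((PySem.List.remove? (S.getD b []) ((S.getD a []).headD 0)).getD (S.getD b []))) < totalLen S :=
        totalLen_set_lt hb (length_remove_lt hc.1)
      if ((PySem.List.remove? (S.getD b []) ((S.getD a []).headD 0)).getD (S.getD b [])).length = 1 then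
        -- len(j) == 1: similiars = del_copy(similiars), then resume the inner loop
        match outerA 0 (S.set b ((PySem.List.remove? (S.getD b []) ((S.getD a []).headD 0)).getD (S.getD b []))) with
        | ⟨T, hT⟩ =>
          match innerA a (b + 1) T with
          | ⟨U, hU⟩ =>
            ⟨U, le_trans hU.1 (le_trans hT.1 (le_of_lt hlt)),
              by rw [hU.2, hT.2]; exact List.length_set ..⟩
      else
        match innerA a (b + 1) (S.set b ((PySem.List.remove? (S.getD b []) ((S.getD a []).headD 0)).getD (S.getD b []))) with
        | ⟨U, hU⟩ =>
          ⟨U, le_trans hU.1 (le_of_lt hlt), by rw [hU.2]; exact List.length_set ..⟩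
    else
      innerA a (b + 1) S
  else ⟨S, le_rfl, rfl⟩
termination_by (totalLen S, 0, S.length - b)
decreasing_by
  · exact Prod.Lex.left _ _ hlt
  · have : totalLen T < totalLen S := lt_of_le_of_lt hT.1 hlt
    exact Prod.Lex.left _ _ this
  · exact Prod.Lex.left _ _ hlt
  · exact Prod.Lex.right _ (Prod.Lex.right _ (by omega))
end

def del_copy (similiars : List (List Int)) : List (List Int) :=
  (outerA 0 similiars).val

-- ===== PORT B =====
-- B = one flat loop over an explicit stack of suspended loop positions (a, b);
-- ob = none encodes Python's b == -1 ("outer check for row a").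
def wFrame (n : Nat) : Nat × Option Nat → Nat
  | (a, none) => (n + 2) * (n - a) + (n + 2)
  | (a, some b) => (n + 2) * (n - a) + (n + 1 - min b n)

def wStack (n : Nat) (stack : List (Nat × Option Nat)) : Nat :=
  (stack.map (wFrame n)).sum

theorem wStack_cons (n : Nat) (f : Nat × Option Nat) (k : List (Nat × Option Nat)) :
    wStack n (f :: k) = wFrame n f + wStack n k := by
  simp [wStack]

theorem wFrame_pos (n : Nat) (f : Nat × Option Nat) : 0 < wFrame n f := by
  rcases f with ⟨a, _ | b⟩
  · simp only [wFrame]; omega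
  · simp only [wFrame]; rw [Nat.min_def]; split_ifs <;> omega

theorem wFrame_start (n a : Nat) : wFrame n (a, some 0) < wFrame n (a, none) := by
  simp only [wFrame]
  rw [Nat.min_def]; split_ifs <;> omega

theorem wFrame_next_outer (n a : Nat) (h : a < n) :
    wFrame n (a + 1, none) < wFrame n (a, none) := by
  simp only [wFrame]
  rw [show n - a = (n - (a + 1)) + 1 from by omega, Nat.mul_succ]
  omega

theorem wFrame_done_inner (n a b : Nat) (h : a < n) :
    wFrame n (a + 1, none) < wFrame n (a, some b) := by
  simp only [wFrame]
  rw [show n - a = (n - (a + 1)) + 1 from by omega, Nat.mul_succ, Nat.min_def]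
  split_ifs <;> omega

theorem wFrame_next_inner (n a b : Nat) (h : b < n) :
    wFrame n (a, some (b + 1)) < wFrame n (a, some b) := by
  simp only [wFrame]
  rw [Nat.min_def, Nat.min_def]; split_ifs <;> omega

def run (S : List (List Int)) (stack : List (Nat × Option Nat)) : List (List Int) :=
  match stack with
  | [] => S
  | (a, ob) :: k =>
    if ha : S.length ≤ a then run S k
    else
      match ob with
      | none =>
        if (S.getD a []).length = 1 then run S ((a, some 0) :: k)
        else run S ((a + 1, none) :: k)
      | some b =>
        if hb : S.length ≤ b then run S ((a + 1, none) :: k)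
        else
          if hc : (S.getD a []).headD 0 ∈ S.getD b [] ∧ S.getD a [] ≠ S.getD b [] then
            have hlt : totalLen (S.set b ((PySem.List.remove? (S.getD b []) ((S.getD a []).headD 0)).getD (S.getD b []))) < totalLen S :=
              totalLen_set_lt (by omega) (length_remove_lt hc.1)
            if ((PySem.List.remove? (S.getD b []) ((S.getD a []).headD 0)).getD (S.getD b [])).length = 1 then
              run (S.set b ((PySem.List.remove? (S.getD b []) ((S.getD a []).headD 0)).getD (S.getD b [])))
                  ((0, none) :: (a, some (b + 1)) :: k)
            else
              run (S.set b ((PySem.List.remove? (S.getD b []) ((S.getD a []).headD 0)).getD (S.getD b [])))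
                  ((a, some (b + 1)) :: k)
          else run S ((a, some (b + 1)) :: k)
termination_by (totalLen S, wStack S.length stack)
decreasing_by
  · -- pop a finished activation
    exact Prod.Lex.right _ (by
      rw [wStack_cons]
      have := wFrame_pos S.length (a, ob)
      omega)
  · -- (a, none) → (a, some 0)
    exact Prod.Lex.right _ (by
      rw [wStack_cons, wStack_cons]
      have := wFrame_start S.length a
      omega)
  · -- (a, none) → (a + 1, none)
    exact Prod.Lex.right _ (by
      rw [wStack_cons, wStack_cons]
      have := wFrame_next_outer S.length a (by omega)
      omega)
  · -- (a, some b), b past the end → (a + 1, none)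
    exact Prod.Lex.right _ (by
      rw [wStack_cons, wStack_cons]
      have := wFrame_done_inner S.length a b (by omega)
      omega)
  · exact Prod.Lex.left _ _ hlt
  · exact Prod.Lex.left _ _ hlt
  · -- (a, some b) → (a, some (b + 1))
    exact Prod.Lex.right _ (by
      rw [wStack_cons, wStack_cons]
      have := wFrame_next_inner S.length a b (by omega)
      omega)

def del_copy_alt (similiars : List (List Int)) : List (List Int) :=
  run similiars [(0, none)]

-- ===== PRECONDITION & SPEC =====
def Spec_del_copy (similiars : List (List Int)) (out : List (List Int)) : Prop := out = del_copy_alt similiars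
instance (similiars : List (List Int)) (out : List (List Int)) : Decidable (Spec_del_copy similiars out) := by unfold Spec_del_copy; infer_instance

-- ===== CLAIM (what is proved, stated in full; the proofs are below) =====
def Claim_equal_del_copy : Prop := ∀ (similiars : List (List Int)), Dom_del_copy similiars → Spec_del_copy similiars (del_copy similiars)

-- ===== LEMMAS AND PROOFS =====

-- what one stack frame of B amounts to, in terms of A's procedures:
-- finish the suspended inner loop of row a, then continue the outer loop from a+1
def dispatch (S : List (List Int)) (a : Nat) (ob : Option Nat) : List (List Int) :=
  match ob with
  | none => (outerA a S).val
  | some b => (outerA (a + 1) (innerA a b S).val).val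

theorem outerA_val (a : Nat) (S : List (List Int)) :
    (outerA a S).val =
      if a < S.length then
        (if (S.getD a []).length = 1 then (outerA (a + 1) (innerA a 0 S).val).val
         else (outerA (a + 1) S).val)
      else S := by
  rw [outerA]
  split_ifs <;> rfl

theorem innerA_val (a b : Nat) (S : List (List Int)) :
    (innerA a b S).val =
      if b < S.length then
        (if (S.getD a []).headD 0 ∈ S.getD b [] ∧ S.getD a [] ≠ S.getD b [] then
          (if ((PySem.List.remove? (S.getD b []) ((S.getD a []).headD 0)).getD (S.getD b [])).length = 1 then
            (innerA a (b + 1) (outerA 0 (S.set b ((PySem.List.remove? (S.getD b []) ((S.getD a []).headD 0)).getD (S.getD b [])))).val).val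
           else
            (innerA a (b + 1) (S.set b ((PySem.List.remove? (S.getD b []) ((S.getD a []).headD 0)).getD (S.getD b [])))).val)
         else (innerA a (b + 1) S).val)
      else S := by
  rw [innerA]
  split_ifs <;> rfl

theorem run_cons_aux : ∀ (t w : Nat) (S : List (List Int)) (a : Nat) (ob : Option Nat)
    (k : List (Nat × Option Nat)),
    totalLen S < t → wFrame S.length (a, ob) < w → (ob = none ∨ a < S.length) →
    run S ((a, ob) :: k) = run (dispatch S a ob) k := by
  intro t
  induction t with
  | zero => intro w S a ob k ht; exact absurd ht (Nat.not_lt_zero _)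
  | succ t iht =>
    intro w
    induction w with
    | zero => intro S a ob k ht hw; exact absurd hw (Nat.not_lt_zero _)
    | succ w ihw =>
      intro S a ob k ht hw hok
      rcases ob with _ | b
      · -- frame (a, none): Python's b == -1 stage
        rw [run]
        by_cases ha : S.length ≤ a
        · -- outer loop already finished
          rw [dif_pos ha]
          have hd : dispatch S a none = S := by
            show (outerA a S).val = S
            rw [outerA_val, if_neg (by omega : ¬ a < S.length)]
          rw [hd]
        · simp only [dif_neg ha]
          by_cases hs : (S.getD a []).length = 1
          · rw [if_pos hs]
            rw [ihw S a (some 0) k ht (lt_of_lt_of_le (wFrame_start S.length a) (by omega))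
                (Or.inr (by omega))]
            have hd : dispatch S a none = dispatch S a (some 0) := by
              show (outerA a S).val = (outerA (a + 1) (innerA a 0 S).val).val
              rw [outerA_val, if_pos (by omega : a < S.length), if_pos hs]
            rw [hd]
          · rw [if_neg hs]
            rw [ihw S (a + 1) none k ht (lt_of_lt_of_le (wFrame_next_outer S.length a (by omega)) (by omega))
                (Or.inl rfl)]
            have hd : dispatch S a none = dispatch S (a + 1) none := by
              show (outerA a S).val = (outerA (a + 1) S).val
              rw [outerA_val, if_pos (by omega : a < S.length), if_neg hs]
            rw [hd]
      · -- frame (a, some b): inner loop of row a, position b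
        have ha : a < S.length := hok.resolve_left (by simp)
        rw [run]
        simp only [dif_neg (by omega : ¬ S.length ≤ a)]
        by_cases hb : S.length ≤ b
        · -- inner loop finished: continue the outer loop at a + 1
          simp only [dif_pos hb]
          rw [ihw S (a + 1) none k ht (lt_of_lt_of_le (wFrame_done_inner S.length a b (by omega)) (by omega))
              (Or.inl rfl)]
          have hd : dispatch S a (some b) = dispatch S (a + 1) none := by
            show (outerA (a + 1) (innerA a b S).val).val = (outerA (a + 1) S).val
            rw [innerA_val a b S, if_neg (by omega : ¬ b < S.length)]
          rw [hd]
        · simp only [dif_neg hb]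
          by_cases hc : (S.getD a []).headD 0 ∈ S.getD b [] ∧ S.getD a [] ≠ S.getD b []
          · simp only [dif_pos hc]
            have hlt : totalLen (S.set b ((PySem.List.remove? (S.getD b []) ((S.getD a []).headD 0)).getD (S.getD b []))) < totalLen S :=
              totalLen_set_lt (by omega) (length_remove_lt hc.1)
            by_cases h1 : ((PySem.List.remove? (S.getD b []) ((S.getD a []).headD 0)).getD (S.getD b [])).length = 1
            · rw [if_pos h1]
              rw [iht (wFrame (S.set b ((PySem.List.remove? (S.getD b []) ((S.getD a []).headD 0)).getD (S.getD b []))).length (0, none) + 1)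
                    _ 0 none _ (by omega) (by omega) (Or.inl rfl)]
              have hlen2 : (outerA 0 (S.set b ((PySem.List.remove? (S.getD b []) ((S.getD a []).headD 0)).getD (S.getD b [])))).val.length = S.length := by
                rw [(outerA 0 _).property.2, List.length_set]
              rw [show dispatch (S.set b ((PySem.List.remove? (S.getD b []) ((S.getD a []).headD 0)).getD (S.getD b []))) 0 none
                    = (outerA 0 (S.set b ((PySem.List.remove? (S.getD b []) ((S.getD a []).headD 0)).getD (S.getD b [])))).val from rfl]
              rw [iht (wFrame (outerA 0 (S.set b ((PySem.List.remove? (S.getD b []) ((S.getD a []).headD 0)).getD (S.getD b [])))).val.length (a, some (b + 1)) + 1)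
                    _ a (some (b + 1)) k
                    (by
                      have h3 := (outerA 0 (S.set b ((PySem.List.remove? (S.getD b []) ((S.getD a []).headD 0)).getD (S.getD b [])))).property.1
                      omega)
                    (by omega) (Or.inr (by rw [hlen2]; omega))]
              have hd : dispatch S a (some b) = dispatch (outerA 0 (S.set b ((PySem.List.remove? (S.getD b []) ((S.getD a []).headD 0)).getD (S.getD b [])))).val a (some (b + 1)) := by
                show (outerA (a + 1) (innerA a b S).val).val
                  = (outerA (a + 1) (innerA a (b + 1) (outerA 0 (S.set b ((PySem.List.remove? (S.getD b []) ((S.getD a []).headD 0)).getD (S.getD b [])))).val).val).val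
                rw [innerA_val a b S, if_pos (by omega : b < S.length), if_pos hc, if_pos h1]
              rw [hd]
            · rw [if_neg h1]
              rw [iht (wFrame (S.set b ((PySem.List.remove? (S.getD b []) ((S.getD a []).headD 0)).getD (S.getD b []))).length (a, some (b + 1)) + 1)
                    _ a (some (b + 1)) k (by omega) (by omega)
                    (Or.inr (by rw [List.length_set]; omega))]
              have hd : dispatch S a (some b) = dispatch (S.set b ((PySem.List.remove? (S.getD b []) ((S.getD a []).headD 0)).getD (S.getD b []))) a (some (b + 1)) := by
                show (outerA (a + 1) (innerA a b S).val).val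
                  = (outerA (a + 1) (innerA a (b + 1) (S.set b ((PySem.List.remove? (S.getD b []) ((S.getD a []).headD 0)).getD (S.getD b [])))).val).val
                rw [innerA_val a b S, if_pos (by omega : b < S.length), if_pos hc, if_neg h1]
              rw [hd]
          · simp only [dif_neg hc]
            rw [ihw S a (some (b + 1)) k ht (lt_of_lt_of_le (wFrame_next_inner S.length a b (by omega)) (by omega))
                (Or.inr ha)]
            have hd : dispatch S a (some b) = dispatch S a (some (b + 1)) := by
              show (outerA (a + 1) (innerA a b S).val).val
                = (outerA (a + 1) (innerA a (b + 1) S).val).val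
              rw [innerA_val a b S, if_pos (by omega : b < S.length), if_neg hc]
            rw [hd]

theorem run_cons (S : List (List Int)) (a : Nat) (ob : Option Nat)
    (k : List (Nat × Option Nat)) (hok : ob = none ∨ a < S.length) :
    run S ((a, ob) :: k) = run (dispatch S a ob) k :=
  run_cons_aux (totalLen S + 1) (wFrame S.length (a, ob) + 1) S a ob k (by omega) (by omega) hok

-- ===== VERDICT (by name: the statement is the Claim_ definition above) =====
theorem del_copy_spec : Claim_equal_del_copy := by
  intro S _
  unfold Spec_del_copy del_copy del_copy_alt
  rw [run_cons S 0 none [] (Or.inl rfl)]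
  simp [run, dispatch]
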